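-- pv_equiv track=rewrite | github.com/LANL-Bioinformatics/assay_validation | scripts/assay_sum_table.py | negatives_stats
-- ===== SOURCE A (Python) =====
-- def negatives_stats(argument):
--     this_assay, FN_list = argument
--
--     # initialize tallies
--     succeed_tally = 0
--     succeed_one_two = 0
--     one_mm = 0
--     two_mm = 0
--     two_plus = 0
--     three_mm = 0
--     three_plus_fail = 0
--     four_mm = 0
--     five_mm = 0
--     six_mm = 0
--     seven_mm = 0
--     eight_plus_mm = 0
--     eight_plus_fail = 0
--     fail_tally = 0
--     pos_elims = 0
--     neg_elims = 0
--
--     # Get tallies of false negatives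
--     for _ in FN_list:
--         try:
--             three_plus_fail += 1
--             eight_plus_fail += 1
--             fail_tally += 1
--         except:
--             neg_elims += 1
--
--     return (this_assay, [succeed_tally, succeed_one_two, one_mm, two_mm,
--                         two_plus, three_mm, three_plus_fail, four_mm, five_mm,
--                         six_mm, seven_mm, eight_plus_mm, eight_plus_fail,
--                         fail_tally, pos_elims, neg_elims])
-- ===== SOURCE B (Python) =====
-- def negatives_stats(argument):
--     this_assay, FN_list = argument
--     n = len(FN_list)
--     # all tallies are zero except the three that count every false negative
--     return (this_assay, [0, 0, 0, 0, 0, 0, n, 0, 0, 0, 0, 0, n, n, 0, 0])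
-- ===== Notes on version B (the rewrite author's own statement) =====
-- stated objective: simpler
-- what changed: Replaces the per-element counting loop with a single len() call: the three nonzero tallies all equal len(FN_list), so the 16-element vector is built directly in closed form.
import Mathlib
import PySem

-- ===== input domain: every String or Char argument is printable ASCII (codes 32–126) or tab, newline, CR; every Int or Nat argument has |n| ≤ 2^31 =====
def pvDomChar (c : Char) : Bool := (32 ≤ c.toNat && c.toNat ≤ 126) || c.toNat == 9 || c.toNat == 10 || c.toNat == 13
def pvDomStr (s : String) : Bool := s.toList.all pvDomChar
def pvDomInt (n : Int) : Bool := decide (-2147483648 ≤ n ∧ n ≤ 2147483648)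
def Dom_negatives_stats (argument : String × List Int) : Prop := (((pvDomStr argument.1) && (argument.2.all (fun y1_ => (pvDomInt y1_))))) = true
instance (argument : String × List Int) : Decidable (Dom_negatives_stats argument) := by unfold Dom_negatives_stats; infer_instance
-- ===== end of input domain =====

-- B replaces A's counting loop by the closed form n = len(FN_list); objective: simpler.

-- ===== PORT A =====
-- Port of A: loop over FN_list incrementing the three tallies (the try/except never fires).
def negatives_stats (argument : String × List Int) : String × List Int :=
  let this_assay := argument.1
  let FN_list := argument.2
  let s : Int × Int × Int × Int :=
    FN_list.foldl (fun (st : Int × Int × Int × Int) _ =>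
      (st.1 + 1, st.2.1 + 1, st.2.2.1 + 1, st.2.2.2)) (0, 0, 0, 0)
  (this_assay, [0, 0, 0, 0, 0, 0, s.1, 0, 0, 0, 0, 0, s.2.1, s.2.2.1, 0, s.2.2.2])

-- ===== PORT B =====
-- Port of B: closed form, n = len(FN_list).
def negatives_stats_alt (argument : String × List Int) : String × List Int :=
  let n : Int := argument.2.length
  (argument.1, [0, 0, 0, 0, 0, 0, n, 0, 0, 0, 0, 0, n, n, 0, 0])

-- ===== PRECONDITION & SPEC =====
def Spec_negatives_stats (argument : String × List Int) (out : String × List Int) : Prop := out = negatives_stats_alt argument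
instance (argument : String × List Int) (out : String × List Int) : Decidable (Spec_negatives_stats argument out) := by unfold Spec_negatives_stats; infer_instance

-- ===== CLAIM (what is proved, stated in full; the proofs are below) =====
def Claim_equal_negatives_stats : Prop := ∀ (argument : String × List Int), Dom_negatives_stats argument → Spec_negatives_stats argument (negatives_stats argument)

-- ===== LEMMAS AND PROOFS =====

-- ===== VERDICT (by name: the statement is the Claim_ definition above) =====
theorem fold_count (l : List Int) (a b c d : Int) :
    l.foldl (fun (st : Int × Int × Int × Int) _ =>
      (st.1 + 1, st.2.1 + 1, st.2.2.1 + 1, st.2.2.2)) (a, b, c, d)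
      = (a + l.length, b + l.length, c + l.length, d) := by
  induction l generalizing a b c d with
  | nil => simp
  | cons x xs ih => simp [List.foldl, ih]; omega

theorem negatives_stats_spec : Claim_equal_negatives_stats := by
  intro arg _
  unfold Spec_negatives_stats negatives_stats negatives_stats_alt
  simp [fold_count]
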